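-- pv_equiv track=rewrite | github.com/devYaoYH/adventofcode2021 | src/22/main2.py | shatter
-- ===== SOURCE A (Python) =====
-- def line_intersect(l1, l2):
--     if (l1[0] >= l2[0] and l1[0] <= l2[1]) or (l2[0] >= l1[0] and l2[0] <= l1[1]):
--         return (max(l1[0],l2[0]),min(l1[1],l2[1]))
--     else:
--         return None
--
-- def shatter(c1, c2):
--     # Get insection cubelet between c1 & c2
--     # union of line intersects in x,y,z axis
--     interval_x = line_intersect(c1[0], c2[0])
--     interval_y = line_intersect(c1[1], c2[1])
--     interval_z = line_intersect(c1[2], c2[2])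
--     if not interval_x or not interval_y or not interval_z: # no intersection
--         return [c]
--     # Start 'collapsing' c1 to this cubelet
--     overlap = (interval_x, interval_y, interval_z)
--     cubelets = []
--     while c1 != overlap: # case of containment covered by False in 1st iteration
--         if c1[0] != overlap[0]: # collapse x-axis
--             if c1[0][0] < overlap[0][0]:
--                 cubelets.append(((c1[0][0],overlap[0][0]-1), c1[1], c1[2]))
--                 c1 = ((overlap[0][0],c1[0][1]), c1[1], c1[2])
--             elif c1[0][1] > overlap[0][1]:
--                 cubelets.append(((overlap[0][1]+1,c1[0][1]), c1[1], c1[2]))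
--                 c1 = ((c1[0][0],overlap[0][1]), c1[1], c1[2])
--         elif c1[1] != overlap[1]: # collapse y-axis
--             if c1[1][0] < overlap[1][0]:
--                 cubelets.append((c1[0], (c1[1][0],overlap[1][0]-1), c1[2]))
--                 c1 = (c1[0], (overlap[1][0],c1[1][1]), c1[2])
--             elif c1[1][1] > overlap[1][1]:
--                 cubelets.append((c1[0], (overlap[1][1]+1,c1[1][1]), c1[2]))
--                 c1 = (c1[0], (c1[1][0],overlap[1][1]), c1[2])
--         elif c1[2] != overlap[2]: # collapse z-axis
--             if c1[2][0] < overlap[2][0]: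
--                 cubelets.append((c1[0], c1[1], (c1[2][0],overlap[2][0]-1)))
--                 c1 = (c1[0], c1[1], (overlap[2][0],c1[2][1]))
--             elif c1[2][1] > overlap[2][1]:
--                 cubelets.append((c1[0], c1[1], (overlap[2][1]+1,c1[2][1])))
--                 c1 = (c1[0], c1[1], (c1[2][0],overlap[2][1]))
--         else:
--             raise ValueError(f"Error, cubes should overlap: {c1} | {overlap}")
--     return cubelets
-- ===== SOURCE B (Python) =====
-- def _overlaps(l1, l2):
--     return (l1[0] >= l2[0] and l1[0] <= l2[1]) or (l2[0] >= l1[0] and l2[0] <= l1[1])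
--
-- def _split1d(seg, ov):
--     # pieces of seg hanging outside ov (low side first), and seg clamped to ov
--     lo, hi = seg
--     olo, ohi = ov
--     cuts = []
--     if lo < olo:
--         cuts.append((lo, olo - 1))
--         lo = olo
--     if hi > ohi:
--         cuts.append((ohi + 1, hi))
--         hi = ohi
--     return cuts, (lo, hi)
--
-- def shatter(c1, c2):
--     if not all(_overlaps(a, b) for a, b in zip(c1, c2)):
--         raise ValueError("cubes do not overlap")
--     ov = [(max(a[0], b[0]), min(a[1], b[1])) for a, b in zip(c1, c2)]
--     (xc, x), (yc, y), (zc, z) = (_split1d(c1[i], ov[i]) for i in range(3))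
--     return ([(i, c1[1], c1[2]) for i in xc]
--             + [(x, j, c1[2]) for j in yc]
--             + [(x, y, k) for k in zc])
-- ===== Notes on version B (the rewrite author's own statement) =====
-- stated objective: simpler
-- what changed: Replaces A's while-loop that repeatedly re-dispatches on which axis still differs from the overlap with a single straight-line pass: a 1-D helper splits each axis interval into its low/high off-cuts and clamped core once, and the pieces are assembled by concatenating three comprehensions; where A's 'return [c]' raises NameError (no overlap, excluded by Pre_) B raises ValueError.
import Mathlib
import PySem

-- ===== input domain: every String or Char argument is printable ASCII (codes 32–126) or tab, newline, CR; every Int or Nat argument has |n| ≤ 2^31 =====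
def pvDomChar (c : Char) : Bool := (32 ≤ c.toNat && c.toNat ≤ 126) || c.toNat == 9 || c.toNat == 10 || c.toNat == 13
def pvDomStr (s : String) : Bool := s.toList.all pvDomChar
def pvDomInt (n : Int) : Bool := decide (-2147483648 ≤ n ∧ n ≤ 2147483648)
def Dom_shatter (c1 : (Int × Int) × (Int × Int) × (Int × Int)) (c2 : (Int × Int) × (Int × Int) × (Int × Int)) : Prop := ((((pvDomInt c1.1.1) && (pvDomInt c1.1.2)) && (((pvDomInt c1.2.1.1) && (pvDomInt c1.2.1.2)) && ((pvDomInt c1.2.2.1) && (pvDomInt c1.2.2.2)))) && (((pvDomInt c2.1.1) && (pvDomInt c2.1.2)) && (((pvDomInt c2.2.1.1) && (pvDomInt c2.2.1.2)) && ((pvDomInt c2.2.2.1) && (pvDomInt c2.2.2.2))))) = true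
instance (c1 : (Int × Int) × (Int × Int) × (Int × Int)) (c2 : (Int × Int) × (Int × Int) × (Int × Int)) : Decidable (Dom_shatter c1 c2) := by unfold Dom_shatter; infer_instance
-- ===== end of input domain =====

-- ===== PORT A =====
-- B re-decomposes A's re-dispatching while-loop into one straight-line per-axis split (simpler); on non-overlapping cubes A raises NameError and B raises ValueError (excluded by Pre_).

-- port of line_intersect
def lineIntersect (l1 l2 : Int × Int) : Option (Int × Int) :=
  if (l1.1 ≥ l2.1 ∧ l1.1 ≤ l2.2) ∨ (l2.1 ≥ l1.1 ∧ l2.1 ≤ l1.2) then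
    some (max l1.1 l2.1, min l1.2 l2.2)
  else none

-- the while-loop of A; fuel is only a totality guard (the loop runs at most 6
-- iterations: each iteration pins one of the six endpoints to the overlap's).
def shatterLoop : Nat → ((Int × Int) × (Int × Int) × (Int × Int)) → ((Int × Int) × (Int × Int) × (Int × Int)) → List ((Int × Int) × (Int × Int) × (Int × Int)) → List ((Int × Int) × (Int × Int) × (Int × Int))
  | 0, _, _, acc => acc  -- fuel guard only; never reached (the loop runs ≤ 6 iterations, fuel is 7)
  | fuel + 1, c1, ov, acc =>
    if c1 = ov then acc
    else if c1.1 ≠ ov.1 then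
      if c1.1.1 < ov.1.1 then
        shatterLoop fuel ((ov.1.1, c1.1.2), c1.2) ov (acc ++ [((c1.1.1, ov.1.1 - 1), c1.2)])
      else if c1.1.2 > ov.1.2 then
        shatterLoop fuel ((c1.1.1, ov.1.2), c1.2) ov (acc ++ [((ov.1.2 + 1, c1.1.2), c1.2)])
      else shatterLoop fuel c1 ov acc  -- Python: iteration does nothing, loops again (unreachable: ov.1.1 ≥ c1.1.1 and ov.1.2 ≤ c1.1.2 always)
    else if c1.2.1 ≠ ov.2.1 then
      if c1.2.1.1 < ov.2.1.1 then
        shatterLoop fuel (c1.1, (ov.2.1.1, c1.2.1.2), c1.2.2) ov (acc ++ [(c1.1, (c1.2.1.1, ov.2.1.1 - 1), c1.2.2)])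
      else if c1.2.1.2 > ov.2.1.2 then
        shatterLoop fuel (c1.1, (c1.2.1.1, ov.2.1.2), c1.2.2) ov (acc ++ [(c1.1, (ov.2.1.2 + 1, c1.2.1.2), c1.2.2)])
      else shatterLoop fuel c1 ov acc  -- unreachable, as above
    else if c1.2.2 ≠ ov.2.2 then
      if c1.2.2.1 < ov.2.2.1 then
        shatterLoop fuel (c1.1, c1.2.1, (ov.2.2.1, c1.2.2.2)) ov (acc ++ [(c1.1, c1.2.1, (c1.2.2.1, ov.2.2.1 - 1))])
      else if c1.2.2.2 > ov.2.2.2 then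
        shatterLoop fuel (c1.1, c1.2.1, (c1.2.2.1, ov.2.2.2)) ov (acc ++ [(c1.1, c1.2.1, (ov.2.2.2 + 1, c1.2.2.2))])
      else shatterLoop fuel c1 ov acc  -- unreachable, as above
    else acc  -- Python: raise ValueError; unreachable (c1 ≠ ov yet all components equal)

def shatter (c1 : (Int × Int) × (Int × Int) × (Int × Int)) (c2 : (Int × Int) × (Int × Int) × (Int × Int)) : List ((Int × Int) × (Int × Int) × (Int × Int)) :=
  match lineIntersect c1.1 c2.1, lineIntersect c1.2.1 c2.2.1, lineIntersect c1.2.2 c2.2.2 with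
  | some ix, some iy, some iz => shatterLoop 7 c1 (ix, iy, iz) []
  | _, _, _ => []  -- Python: NameError ('return [c]', c undefined); excluded by Pre_shatter

-- ===== PORT B =====
def overlapsB (l1 l2 : Int × Int) : Bool :=
  (l1.1 ≥ l2.1 && l1.1 ≤ l2.2) || (l2.1 ≥ l1.1 && l2.1 ≤ l1.2)

-- port of _split1d
def split1d (seg ov : Int × Int) : List (Int × Int) × (Int × Int) :=
  let lo := seg.1; let hi := seg.2
  let olo := ov.1; let ohi := ov.2
  let p1 := if lo < olo then ([(lo, olo - 1)], olo) else ([], lo)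
  let p2 := if hi > ohi then (p1.1 ++ [(ohi + 1, hi)], ohi) else (p1.1, hi)
  (p2.1, (p1.2, p2.2))

def shatter_alt (c1 : (Int × Int) × (Int × Int) × (Int × Int)) (c2 : (Int × Int) × (Int × Int) × (Int × Int)) : List ((Int × Int) × (Int × Int) × (Int × Int)) :=
  if !(overlapsB c1.1 c2.1 && overlapsB c1.2.1 c2.2.1 && overlapsB c1.2.2 c2.2.2) then []  -- Python B: raise ValueError; excluded by Pre_shatter
  else
    let sx := split1d c1.1 (max c1.1.1 c2.1.1, min c1.1.2 c2.1.2)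
    let sy := split1d c1.2.1 (max c1.2.1.1 c2.2.1.1, min c1.2.1.2 c2.2.1.2)
    let sz := split1d c1.2.2 (max c1.2.2.1 c2.2.2.1, min c1.2.2.2 c2.2.2.2)
    sx.1.map (fun i => (i, c1.2.1, c1.2.2))
      ++ sy.1.map (fun j => (sx.2, j, c1.2.2))
      ++ sz.1.map (fun k => (sx.2, sy.2, k))

-- ===== PRECONDITION & SPEC =====
-- Pre_ excludes exactly the inputs where some axis pair of intervals fails the
-- overlap test: there A executes 'return [c]' with 'c' an undefined name and
-- raises NameError (B raises a ValueError on those inputs).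
def Pre_shatter (c1 : (Int × Int) × (Int × Int) × (Int × Int)) (c2 : (Int × Int) × (Int × Int) × (Int × Int)) : Prop :=
  ((c1.1.1 ≥ c2.1.1 ∧ c1.1.1 ≤ c2.1.2) ∨ (c2.1.1 ≥ c1.1.1 ∧ c2.1.1 ≤ c1.1.2)) ∧
  ((c1.2.1.1 ≥ c2.2.1.1 ∧ c1.2.1.1 ≤ c2.2.1.2) ∨ (c2.2.1.1 ≥ c1.2.1.1 ∧ c2.2.1.1 ≤ c1.2.1.2)) ∧
  ((c1.2.2.1 ≥ c2.2.2.1 ∧ c1.2.2.1 ≤ c2.2.2.2) ∨ (c2.2.2.1 ≥ c1.2.2.1 ∧ c2.2.2.1 ≤ c1.2.2.2))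

instance (c1 : (Int × Int) × (Int × Int) × (Int × Int)) (c2 : (Int × Int) × (Int × Int) × (Int × Int)) : Decidable (Pre_shatter c1 c2) := by unfold Pre_shatter; infer_instance

def pvWitness_shatter : ((Int × Int) × (Int × Int) × (Int × Int)) × ((Int × Int) × (Int × Int) × (Int × Int)) :=
  (((0, 4), (0, 4), (0, 4)), ((1, 2), (1, 2), (1, 2)))

def Spec_shatter (c1 : (Int × Int) × (Int × Int) × (Int × Int)) (c2 : (Int × Int) × (Int × Int) × (Int × Int)) (out : List ((Int × Int) × (Int × Int) × (Int × Int))) : Prop := out = shatter_alt c1 c2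
instance (c1 : (Int × Int) × (Int × Int) × (Int × Int)) (c2 : (Int × Int) × (Int × Int) × (Int × Int)) (out : List ((Int × Int) × (Int × Int) × (Int × Int))) : Decidable (Spec_shatter c1 c2 out) := by unfold Spec_shatter; infer_instance

-- ===== CLAIM (what is proved, stated in full; the proofs are below) =====
def Claim_equal_shatter : Prop := ∀ (c1 : (Int × Int) × (Int × Int) × (Int × Int)) (c2 : (Int × Int) × (Int × Int) × (Int × Int)), Dom_shatter c1 c2 → Pre_shatter c1 c2 → Spec_shatter c1 c2 (shatter c1 c2)

-- ===== LEMMAS AND PROOFS =====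
lemma loop_done (n : Nat) (ov : (Int × Int) × (Int × Int) × (Int × Int))
    (acc : List ((Int × Int) × (Int × Int) × (Int × Int))) :
    shatterLoop (n + 1) ov ov acc = acc := by
  simp [shatterLoop]

lemma stepXlo (n : Nat) (a b c d e f p q r s t u : Int) (acc : List ((Int × Int) × (Int × Int) × (Int × Int))) (h : a < p) :
    shatterLoop (n + 1) ((a, b), (c, d), (e, f)) ((p, q), (r, s), (t, u)) acc
      = shatterLoop n ((p, b), (c, d), (e, f)) ((p, q), (r, s), (t, u)) (acc ++ [((a, p - 1), (c, d), (e, f))]) := by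
  simp [shatterLoop, h, h.ne, Prod.ext_iff]

lemma stepXhi (n : Nat) (b c d e f p q r s t u : Int) (acc : List ((Int × Int) × (Int × Int) × (Int × Int))) (h : q < b) :
    shatterLoop (n + 1) ((p, b), (c, d), (e, f)) ((p, q), (r, s), (t, u)) acc
      = shatterLoop n ((p, q), (c, d), (e, f)) ((p, q), (r, s), (t, u)) (acc ++ [((q + 1, b), (c, d), (e, f))]) := by
  simp [shatterLoop, h, h.ne', Prod.ext_iff]

lemma stepYlo (n : Nat) (c d e f p q r s t u : Int) (acc : List ((Int × Int) × (Int × Int) × (Int × Int))) (h : c < r) :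
    shatterLoop (n + 1) ((p, q), (c, d), (e, f)) ((p, q), (r, s), (t, u)) acc
      = shatterLoop n ((p, q), (r, d), (e, f)) ((p, q), (r, s), (t, u)) (acc ++ [((p, q), (c, r - 1), (e, f))]) := by
  simp [shatterLoop, h, h.ne, Prod.ext_iff]

lemma stepYhi (n : Nat) (d e f p q r s t u : Int) (acc : List ((Int × Int) × (Int × Int) × (Int × Int))) (h : s < d) :
    shatterLoop (n + 1) ((p, q), (r, d), (e, f)) ((p, q), (r, s), (t, u)) acc
      = shatterLoop n ((p, q), (r, s), (e, f)) ((p, q), (r, s), (t, u)) (acc ++ [((p, q), (s + 1, d), (e, f))]) := by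
  simp [shatterLoop, h, h.ne', Prod.ext_iff]

lemma stepZlo (n : Nat) (e f p q r s t u : Int) (acc : List ((Int × Int) × (Int × Int) × (Int × Int))) (h : e < t) :
    shatterLoop (n + 1) ((p, q), (r, s), (e, f)) ((p, q), (r, s), (t, u)) acc
      = shatterLoop n ((p, q), (r, s), (t, f)) ((p, q), (r, s), (t, u)) (acc ++ [((p, q), (r, s), (e, t - 1))]) := by
  simp [shatterLoop, h, h.ne, Prod.ext_iff]

lemma stepZhi (n : Nat) (f p q r s t u : Int) (acc : List ((Int × Int) × (Int × Int) × (Int × Int))) (h : u < f) :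
    shatterLoop (n + 1) ((p, q), (r, s), (t, f)) ((p, q), (r, s), (t, u)) acc
      = shatterLoop n ((p, q), (r, s), (t, u)) ((p, q), (r, s), (t, u)) (acc ++ [((p, q), (r, s), (u + 1, f))]) := by
  simp [shatterLoop, h, h.ne', Prod.ext_iff]

lemma loopZ (n : Nat) (e f p q r s t u : Int) (acc : List ((Int × Int) × (Int × Int) × (Int × Int)))
    (h5 : e ≤ t) (h6 : u ≤ f) :
    shatterLoop (n + 3) ((p, q), (r, s), (e, f)) ((p, q), (r, s), (t, u)) acc
      = acc ++ (if e < t then [((p, q), (r, s), (e, t - 1))] else [])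
            ++ (if u < f then [((p, q), (r, s), (u + 1, f))] else []) := by
  rcases lt_or_eq_of_le h5 with h5' | h5' <;> rcases lt_or_eq_of_le h6 with h6' | h6'
  · rw [stepZlo (n := n + 2) (h := h5'), stepZhi (n := n + 1) (h := h6'), loop_done]
    simp [h5', h6']
  · subst h6'
    rw [stepZlo (n := n + 2) (h := h5'), loop_done]
    simp [h5']
  · subst h5'
    rw [stepZhi (n := n + 2) (h := h6'), loop_done]
    simp [h6']
  · subst h5'; subst h6'
    rw [loop_done]
    simp

lemma loopY (n : Nat) (c d e f p q r s t u : Int) (acc : List ((Int × Int) × (Int × Int) × (Int × Int)))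
    (h3 : c ≤ r) (h4 : s ≤ d) (h5 : e ≤ t) (h6 : u ≤ f) :
    shatterLoop (n + 5) ((p, q), (c, d), (e, f)) ((p, q), (r, s), (t, u)) acc
      = acc ++ (if c < r then [((p, q), (c, r - 1), (e, f))] else [])
            ++ (if s < d then [((p, q), (s + 1, d), (e, f))] else [])
            ++ (if e < t then [((p, q), (r, s), (e, t - 1))] else [])
            ++ (if u < f then [((p, q), (r, s), (u + 1, f))] else []) := by
  rcases lt_or_eq_of_le h3 with h3' | h3' <;> rcases lt_or_eq_of_le h4 with h4' | h4'
  · rw [stepYlo (n := n + 4) (h := h3'), stepYhi (n := n + 3) (h := h4'),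
      loopZ (n := n) (h5 := h5) (h6 := h6)]
    simp [h3', h4', List.append_assoc]
  · subst h4'
    rw [stepYlo (n := n + 4) (h := h3'), loopZ (n := n + 1) (h5 := h5) (h6 := h6)]
    simp [h3', List.append_assoc]
  · subst h3'
    rw [stepYhi (n := n + 4) (h := h4'), loopZ (n := n + 1) (h5 := h5) (h6 := h6)]
    simp [h4', List.append_assoc]
  · subst h3'; subst h4'
    rw [loopZ (n := n + 2) (h5 := h5) (h6 := h6)]
    simp [List.append_assoc]

lemma shatterLoop_main (a b c d e f p q r s t u : Int)
    (acc : List ((Int × Int) × (Int × Int) × (Int × Int)))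
    (h1 : a ≤ p) (h2 : q ≤ b) (h3 : c ≤ r) (h4 : s ≤ d) (h5 : e ≤ t) (h6 : u ≤ f) :
    shatterLoop 7 ((a, b), (c, d), (e, f)) ((p, q), (r, s), (t, u)) acc
      = acc ++ (if a < p then [((a, p - 1), (c, d), (e, f))] else [])
            ++ (if q < b then [((q + 1, b), (c, d), (e, f))] else [])
            ++ (if c < r then [((p, q), (c, r - 1), (e, f))] else [])
            ++ (if s < d then [((p, q), (s + 1, d), (e, f))] else [])
            ++ (if e < t then [((p, q), (r, s), (e, t - 1))] else [])
            ++ (if u < f then [((p, q), (r, s), (u + 1, f))] else []) := by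
  rcases lt_or_eq_of_le h1 with h1' | h1' <;> rcases lt_or_eq_of_le h2 with h2' | h2'
  · rw [show (7 : Nat) = 6 + 1 from rfl, stepXlo (n := 6) (h := h1'),
      stepXhi (n := 5) (h := h2'), loopY (n := 0) (h3 := h3) (h4 := h4) (h5 := h5) (h6 := h6)]
    simp [h1', h2', List.append_assoc]
  · subst h2'
    rw [show (7 : Nat) = 6 + 1 from rfl, stepXlo (n := 6) (h := h1'),
      loopY (n := 1) (h3 := h3) (h4 := h4) (h5 := h5) (h6 := h6)]
    simp [h1', List.append_assoc]
  · subst h1'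
    rw [show (7 : Nat) = 6 + 1 from rfl, stepXhi (n := 6) (h := h2'),
      loopY (n := 1) (h3 := h3) (h4 := h4) (h5 := h5) (h6 := h6)]
    simp [h2', List.append_assoc]
  · subst h1'; subst h2'
    rw [loopY (n := 2) (h3 := h3) (h4 := h4) (h5 := h5) (h6 := h6)]
    simp [List.append_assoc]

-- ===== VERDICT (by name: the statement is the Claim_ definition above) =====
theorem shatter_spec : Claim_equal_shatter := by
  intro c1 c2 _ hpre
  obtain ⟨⟨a, b⟩, ⟨c, d⟩, ⟨e, f⟩⟩ := c1
  obtain ⟨⟨a2, b2⟩, ⟨c2, d2⟩, ⟨e2, f2⟩⟩ := c2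
  obtain ⟨hx, hy, hz⟩ := hpre
  simp only at hx hy hz
  have hcond : (overlapsB (a, b) (a2, b2) && (overlapsB (c, d) (c2, d2) && overlapsB (e, f) (e2, f2))) = true := by
    unfold overlapsB
    simp only [Bool.and_eq_true, Bool.or_eq_true, decide_eq_true_eq, ge_iff_le]
    exact ⟨by tauto, by tauto, by tauto⟩
  unfold Spec_shatter shatter lineIntersect
  simp only
  rw [if_pos hx, if_pos hy, if_pos hz]
  simp only
  rw [shatterLoop_main a b c d e f (max a a2) (min b b2) (max c c2) (min d d2) (max e e2) (min f f2) []
    (le_max_left _ _) (min_le_left _ _) (le_max_left _ _) (min_le_left _ _)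
    (le_max_left _ _) (min_le_left _ _)]
  unfold shatter_alt split1d
  simp only [gt_iff_lt]
  clear hx hy hz
  obtain ⟨p, hP⟩ : ∃ p, max a a2 = p := ⟨_, rfl⟩
  obtain ⟨q, hQ⟩ : ∃ q, min b b2 = q := ⟨_, rfl⟩
  obtain ⟨r, hR⟩ : ∃ r, max c c2 = r := ⟨_, rfl⟩
  obtain ⟨s, hS⟩ : ∃ s, min d d2 = s := ⟨_, rfl⟩
  obtain ⟨t, hT⟩ : ∃ t, max e e2 = t := ⟨_, rfl⟩
  obtain ⟨u, hU⟩ : ∃ u, min f f2 = u := ⟨_, rfl⟩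
  have hp : a ≤ p := hP ▸ le_max_left a a2
  have hq : q ≤ b := hQ ▸ min_le_left b b2
  have hr : c ≤ r := hR ▸ le_max_left c c2
  have hs : s ≤ d := hS ▸ min_le_left d d2
  have ht : e ≤ t := hT ▸ le_max_left e e2
  have hu : u ≤ f := hU ▸ min_le_left f f2
  rw [hP, hQ, hR, hS, hT, hU]
  clear hP hQ hR hS hT hU
  rcases lt_or_eq_of_le hp with h1 | rfl <;> rcases lt_or_eq_of_le hq with h2 | rfl <;>
    rcases lt_or_eq_of_le hr with h3 | rfl <;> rcases lt_or_eq_of_le hs with h4 | rfl <;>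
    rcases lt_or_eq_of_le ht with h5 | rfl <;> rcases lt_or_eq_of_le hu with h6 | rfl <;>
    simp [*]
  all_goals simp only [Bool.and_eq_true] at hcond
  all_goals first
    | tauto
    | (rintro h; simp only [hcond.1, hcond.2.1, hcond.2.2, Bool.true_eq_false, or_self] at h)
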